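-- pv_equiv track=rewrite | github.com/LiorAvrahami/Israel_Weather_Data_Plotter | time_span_defs.py | get_common_filter
-- ===== SOURCE A (Python) =====
-- def get_common_filter(filter_itr):
--     b_daytime_is_same = True
--     daytime = None
--     b_yeartime_is_same = True
--     yeartime = None
--     for filter in filter_itr:
--         if daytime is None:
--             daytime = filter["day"]
--         else:
--             if filter["day"] != daytime:
--                 b_daytime_is_same = False
--         if yeartime is None:
--             yeartime = filter["year"]
--         else:
--             if filter["year"] != yeartime:
--                 b_yeartime_is_same = False
--     if b_yeartime_is_same and b_daytime_is_same:
--         return {"day":daytime,"year":yeartime}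
--     if (not b_yeartime_is_same) and b_daytime_is_same:
--         return {"day":daytime}
--     if b_yeartime_is_same and (not b_daytime_is_same):
--         return {"year":yeartime}
--     if (not b_yeartime_is_same) and (not b_daytime_is_same):
--         return {}
-- ===== SOURCE B (Python) =====
-- def get_common_filter(filter_itr):
--     filters = list(filter_itr)
--     result = {}
--     for key in ("day", "year"):
--         vals = [f[key] for f in filters]
--         if len(set(vals)) == 1:
--             result[key] = vals[0]
--     return result
-- ===== Notes on version B (the rewrite author's own statement) =====
-- stated objective: simpler
-- what changed: Replaces A's fused single pass with four state variables and four explicit return branches by two independent per-key passes (collect the key's values, uniform iff the value set has size 1) assembling the result dict incrementally.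
-- outside the precondition, e.g. on get_common_filter([]): A returns {'day': None, 'year': None}, B returns {}
import Mathlib
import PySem

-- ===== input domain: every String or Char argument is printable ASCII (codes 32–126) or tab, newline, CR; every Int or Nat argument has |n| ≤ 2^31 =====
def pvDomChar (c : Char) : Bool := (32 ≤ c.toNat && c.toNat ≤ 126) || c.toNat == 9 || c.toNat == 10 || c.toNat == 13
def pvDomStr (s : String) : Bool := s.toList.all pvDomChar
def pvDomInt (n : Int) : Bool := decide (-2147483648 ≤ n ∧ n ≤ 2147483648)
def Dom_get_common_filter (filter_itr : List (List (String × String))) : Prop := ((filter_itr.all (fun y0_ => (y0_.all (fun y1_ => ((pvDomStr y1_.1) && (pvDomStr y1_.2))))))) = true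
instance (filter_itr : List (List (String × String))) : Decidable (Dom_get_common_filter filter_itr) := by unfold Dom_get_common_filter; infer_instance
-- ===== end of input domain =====

-- ===== PORT A =====
-- B changes the decomposition: two independent per-key uniformity passes instead of A's fused
-- single pass with four state variables and four return branches; same O(n) cost.
-- Port of A: one fold over the filters with state (b_daytime_is_same, daytime, b_yeartime_is_same, yeartime);
-- filter["day"] is Dict.get? with default "" (a missing key raises KeyError in Python and is excluded by Pre_).
def get_common_filter (filter_itr : List (List (String × String))) : List (String × String) :=
  let st := filter_itr.foldl
    (fun (s : Bool × Option String × Bool × Option String) f =>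
      let fd := ((PySem.Dict.mk f).get? "day").getD ""
      let fy := ((PySem.Dict.mk f).get? "year").getD ""
      let s1 : Bool × Option String :=
        match s.2.1 with
        | none => (s.1, some fd)
        | some dv => (if fd != dv then false else s.1, some dv)
      let s2 : Bool × Option String :=
        match s.2.2.2 with
        | none => (s.2.2.1, some fy)
        | some yv => (if fy != yv then false else s.2.2.1, some yv)
      (s1.1, s1.2, s2.1, s2.2))
    (true, none, true, none)
  if st.2.2.1 && st.1 then [("day", st.2.1.getD ""), ("year", st.2.2.2.getD "")]
  else if !st.2.2.1 && st.1 then [("day", st.2.1.getD "")]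
  else if st.2.2.1 && !st.1 then [("year", st.2.2.2.getD "")]
  else []

-- ===== PORT B =====
-- Port of B: for each key collect the values, include the key iff set(vals) has one element.
def get_common_filter_alt (filter_itr : List (List (String × String))) : List (String × String) :=
  let filters := filter_itr
  (["day", "year"].foldl
    (fun (result : PySem.Dict String String) key =>
      let vals := filters.map (fun f => ((PySem.Dict.mk f).get? key).getD "")
      if (PySem.Set.ofList vals).length == 1 then result.insert key (vals.headD "") else result)
    PySem.Dict.empty).items

-- ===== PRECONDITION & SPEC =====
-- Pre_ excludes (a) inputs where some filter lacks a "day" or "year" key (A raises KeyError) and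
-- (b) the empty list, on which A returns {'day': None, 'year': None} — None is not a value of the
-- declared String value type, so that output is unrepresentable here (B naturally returns {}).
def Pre_get_common_filter (filter_itr : List (List (String × String))) : Prop :=
  filter_itr ≠ [] ∧ ∀ f ∈ filter_itr,
    ((PySem.Dict.mk f).get? "day").isSome ∧ ((PySem.Dict.mk f).get? "year").isSome
instance (filter_itr : List (List (String × String))) : Decidable (Pre_get_common_filter filter_itr) := by
  unfold Pre_get_common_filter; infer_instance
def pvWitness_get_common_filter : (List (List (String × String))) :=
  [[("day", "1"), ("year", "2000")], [("day", "1"), ("year", "2001")]]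
def Spec_get_common_filter (filter_itr : List (List (String × String))) (out : List (String × String)) : Prop := out = get_common_filter_alt filter_itr
instance (filter_itr : List (List (String × String))) (out : List (String × String)) : Decidable (Spec_get_common_filter filter_itr out) := by unfold Spec_get_common_filter; infer_instance

-- ===== CLAIM (what is proved, stated in full; the proofs are below) =====
def Claim_equal_get_common_filter : Prop := ∀ (filter_itr : List (List (String × String))), Dom_get_common_filter filter_itr → Pre_get_common_filter filter_itr → Spec_get_common_filter filter_itr (get_common_filter filter_itr)

-- ===== LEMMAS AND PROOFS =====

-- A's fold, once both sentinels are set: the flags become "all remaining values equal".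
theorem foldA_some (l : List (List (String × String))) (bd byr : Bool) (d y : String) :
    l.foldl
      (fun (s : Bool × Option String × Bool × Option String) f =>
        let fd := ((PySem.Dict.mk f).get? "day").getD ""
        let fy := ((PySem.Dict.mk f).get? "year").getD ""
        let s1 : Bool × Option String :=
          match s.2.1 with
          | none => (s.1, some fd)
          | some dv => (if fd != dv then false else s.1, some dv)
        let s2 : Bool × Option String :=
          match s.2.2.2 with
          | none => (s.2.2.1, some fy)
          | some yv => (if fy != yv then false else s.2.2.1, some yv)
        (s1.1, s1.2, s2.1, s2.2)) (bd, some d, byr, some y)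
    = (bd && l.all (fun f => ((PySem.Dict.mk f).get? "day").getD "" == d), some d,
       byr && l.all (fun f => ((PySem.Dict.mk f).get? "year").getD "" == y), some y) := by
  induction l generalizing bd byr with
  | nil => simp
  | cons f t ih =>
    simp only [List.foldl_cons, List.all_cons]
    rw [ih]
    cases hd : (((PySem.Dict.mk f).get? "day").getD "" == d) <;>
      cases hy : (((PySem.Dict.mk f).get? "year").getD "" == y) <;>
        simp [bne, hd, hy]

-- set(vals) has one element iff every later value equals the first.
theorem setlen_one_eq_all (a : String) (xs : List String) :
    ((PySem.Set.ofList (a :: xs)).length == 1) = xs.all (fun v => v == a) := by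
  rw [PySem.Set.ofList_cons, Bool.eq_iff_iff]
  simp only [List.length_cons, beq_iff_eq, List.all_eq_true]
  have hmem : ∀ v, v ∈ PySem.Set.discard (PySem.Set.ofList xs) a ↔ v ∈ xs ∧ v ≠ a := by
    intro v; rw [PySem.Set.mem_discard, PySem.Set.mem_ofList]
  constructor
  · intro h v hv
    have hlen : (PySem.Set.discard (PySem.Set.ofList xs) a).length = 0 := by omega
    rw [List.length_eq_zero_iff] at hlen
    by_contra hne
    have := (hmem v).mpr ⟨hv, hne⟩
    simp [hlen] at this
  · intro h
    have hnil : PySem.Set.discard (PySem.Set.ofList xs) a = [] :=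
      List.eq_nil_iff_forall_not_mem.mpr (fun v hv => ((hmem v).mp hv).2 (h v ((hmem v).mp hv).1))
    simp [hnil]

-- ===== VERDICT (by name: the statement is the Claim_ definition above) =====
theorem get_common_filter_spec : Claim_equal_get_common_filter := by
  intro l _ hpre
  obtain ⟨hne, -⟩ := hpre
  unfold Spec_get_common_filter
  match l with
  | [] => exact absurd rfl hne
  | f :: rest =>
    simp only [get_common_filter, get_common_filter_alt, List.foldl_cons, List.foldl_nil,
      List.map_cons]
    rw [foldA_some, setlen_one_eq_all, setlen_one_eq_all]
    cases hb : rest.all (fun g => ((PySem.Dict.mk g).get? "day").getD "" ==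
        ((PySem.Dict.mk f).get? "day").getD "") <;>
      cases hy : rest.all (fun g => ((PySem.Dict.mk g).get? "year").getD "" ==
          ((PySem.Dict.mk f).get? "year").getD "") <;>
        simp only [Bool.true_and, List.all_map, Function.comp_def, hb, hy] <;>
          simp [PySem.Dict.insert, PySem.Dict.contains, PySem.Dict.empty]
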